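-- pv_equiv track=rewrite | github.com/OMGitH/Alza-Selenium-Python | Python_Selenium/utilities.py | check_filename_is_correct
-- ===== SOURCE A (Python) =====
-- def check_filename_is_correct(filename):
-- 	"""Method for checking filename if it is correct, i.e. doesn't contain character that can't be present in filename."""
-- 	restricted_chars = ['\\', '/', ':', '*', '?', '"', '<', '>', '|']
-- 	flag = True
-- 	for char in restricted_chars:
-- 		if char in filename:
-- 			flag = False
-- 			return flag
-- 	return flag
-- ===== SOURCE B (Python) =====
-- def check_filename_is_correct(filename):
-- 	"""Method for checking filename if it is correct, i.e. doesn't contain character that can't be present in filename."""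
-- 	restricted = {'\\', '/', ':', '*', '?', '"', '<', '>', '|'}
-- 	for c in filename:
-- 		if c in restricted:
-- 			return False
-- 	return True
-- ===== Notes on version B (the rewrite author's own statement) =====
-- stated objective: idiomatic
-- what changed: B makes a single pass over the filename's characters testing each against a restricted-character set, instead of A's loop over the restricted list with a substring scan of the filename per restricted character.
import Mathlib
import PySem

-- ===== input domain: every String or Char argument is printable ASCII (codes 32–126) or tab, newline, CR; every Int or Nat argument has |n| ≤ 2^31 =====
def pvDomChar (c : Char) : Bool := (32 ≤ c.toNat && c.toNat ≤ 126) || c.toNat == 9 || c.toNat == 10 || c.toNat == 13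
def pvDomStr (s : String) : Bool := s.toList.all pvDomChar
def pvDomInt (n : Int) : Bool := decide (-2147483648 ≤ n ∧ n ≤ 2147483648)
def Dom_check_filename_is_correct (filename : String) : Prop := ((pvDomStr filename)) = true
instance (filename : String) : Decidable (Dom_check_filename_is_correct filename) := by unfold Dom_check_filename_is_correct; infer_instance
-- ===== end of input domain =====

-- B makes one pass over the filename's characters against a restricted-character set, instead of
-- A's loop over the restricted list with a substring scan of the filename per restricted character.

-- ===== PORT A =====
-- loop 'for char in restricted_chars: if char in filename: return False'
def cfcLoopA (filename : String) : List Char → Bool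
  | [] => true
  | c :: rest =>
      if PySem.Str.isIn (String.ofList [c]) filename then false
      else cfcLoopA filename rest

def check_filename_is_correct (filename : String) : Bool :=
  cfcLoopA filename ['\\', '/', ':', '*', '?', '"', '<', '>', '|']

-- ===== PORT B =====
def cfcRestricted : PySem.Set Char :=
  PySem.Set.ofList ['\\', '/', ':', '*', '?', '"', '<', '>', '|']

-- loop 'for c in filename: if c in restricted: return False'
def cfcLoopB : List Char → Bool
  | [] => true
  | c :: rest =>
      if PySem.Set.contains cfcRestricted c then false
      else cfcLoopB rest

def check_filename_is_correct_alt (filename : String) : Bool :=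
  cfcLoopB filename.toList

-- ===== PRECONDITION & SPEC =====
def Spec_check_filename_is_correct (filename : String) (out : Bool) : Prop := out = check_filename_is_correct_alt filename
instance (filename : String) (out : Bool) : Decidable (Spec_check_filename_is_correct filename out) := by unfold Spec_check_filename_is_correct; infer_instance

-- ===== CLAIM (what is proved, stated in full; the proofs are below) =====
def Claim_equal_check_filename_is_correct : Prop := ∀ (filename : String), Dom_check_filename_is_correct filename → Spec_check_filename_is_correct filename (check_filename_is_correct filename)

-- ===== LEMMAS AND PROOFS =====

lemma cfc_singleton_infix_iff (c : Char) (l : List Char) : [c] <:+: l ↔ c ∈ l := by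
  constructor
  · intro h; exact h.subset (by simp)
  · intro h
    obtain ⟨s, t, rfl⟩ := List.append_of_mem h
    exact ⟨s, t, by simp⟩

lemma cfc_isIn_singleton (c : Char) (s : String) :
    PySem.Str.isIn (String.ofList [c]) s = s.toList.contains c := by
  rw [Bool.eq_iff_iff, PySem.Str.isIn_iff_infix]
  simp [cfc_singleton_infix_iff]

lemma cfcLoopA_eq_all (filename : String) (rs : List Char) :
    cfcLoopA filename rs = rs.all (fun c => !filename.toList.contains c) := by
  induction rs with
  | nil => rfl
  | cons c rest ih =>
      rw [cfcLoopA, cfc_isIn_singleton, List.all_cons, ih]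
      by_cases h : filename.toList.contains c <;> simp [h] <;> simp_all

lemma cfcLoopB_eq_all (cs : List Char) :
    cfcLoopB cs = cs.all (fun c => !(PySem.Set.contains cfcRestricted c)) := by
  induction cs with
  | nil => rfl
  | cons c rest ih =>
      simp only [cfcLoopB, List.all_cons, ih]
      by_cases h : PySem.Set.contains cfcRestricted c <;> simp [h] <;> simp_all

lemma cfc_all_not_contains_comm (xs ys : List Char) :
    xs.all (fun c => !ys.contains c) = ys.all (fun c => !xs.contains c) := by
  rw [Bool.eq_iff_iff]
  simp only [List.all_eq_true, Bool.not_eq_true', List.contains_eq_mem,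
    decide_eq_false_iff_not]
  exact ⟨fun h c hc hm => h c hm hc, fun h c hc hm => h c hm hc⟩

lemma cfcRestricted_eq :
    cfcRestricted = ['\\', '/', ':', '*', '?', '"', '<', '>', '|'] := by decide

-- ===== VERDICT (by name: the statement is the Claim_ definition above) =====
theorem check_filename_is_correct_spec : Claim_equal_check_filename_is_correct := by
  intro filename _
  show check_filename_is_correct filename = check_filename_is_correct_alt filename
  rw [check_filename_is_correct, check_filename_is_correct_alt,
      cfcLoopA_eq_all, cfcLoopB_eq_all]
  simp only [cfcRestricted_eq, PySem.Set.contains]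
  exact cfc_all_not_contains_comm _ _
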